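-- pv_equiv track=rewrite | github.com/sunnysinghraj/API_STORY | script.py | split_by_prepositions
-- ===== SOURCE A (Python) =====
-- def split_by_prepositions(parts_list):
--     prepositions = {"with", "by", "in", "at", "on", "through", "to", "of", "from", "for", "as"}
--     final_parts = []
--
--     for part in parts_list:
--         words = part.strip().split()
--         buffer = []
--         for word in words:
--             if word.lower() in prepositions:
--                 if buffer:
--                     final_parts.append(" ".join(buffer).strip())
--                     buffer = []
--             else:
--                 buffer.append(word)
--         if buffer:
--             final_parts.append(" ".join(buffer).strip())
--
--     return final_parts
-- ===== SOURCE B (Python) =====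
-- def split_by_prepositions(parts_list):
--     prepositions = {"with", "by", "in", "at", "on", "through", "to", "of", "from", "for", "as"}
--     final_parts = []
--
--     for part in parts_list:
--         words = part.strip().split()
--         i, n = 0, len(words)
--         while i < n:
--             if words[i].lower() in prepositions:
--                 i += 1
--                 continue
--             j = i + 1
--             while j < n and words[j].lower() not in prepositions:
--                 j += 1
--             final_parts.append(" ".join(words[i:j]))
--             i = j
--
--     return final_parts
-- ===== Notes on version B (the rewrite author's own statement) =====
-- stated objective: alternative
-- what changed: A accumulates words in a buffer and flushes it at each preposition and at end-of-part; B instead scans each word list with two pointers, extracting each maximal run of non-preposition words directly and joining it once (also dropping A's redundant .strip() on the joined run, which is a no-op since split words contain no whitespace).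
import Mathlib
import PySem

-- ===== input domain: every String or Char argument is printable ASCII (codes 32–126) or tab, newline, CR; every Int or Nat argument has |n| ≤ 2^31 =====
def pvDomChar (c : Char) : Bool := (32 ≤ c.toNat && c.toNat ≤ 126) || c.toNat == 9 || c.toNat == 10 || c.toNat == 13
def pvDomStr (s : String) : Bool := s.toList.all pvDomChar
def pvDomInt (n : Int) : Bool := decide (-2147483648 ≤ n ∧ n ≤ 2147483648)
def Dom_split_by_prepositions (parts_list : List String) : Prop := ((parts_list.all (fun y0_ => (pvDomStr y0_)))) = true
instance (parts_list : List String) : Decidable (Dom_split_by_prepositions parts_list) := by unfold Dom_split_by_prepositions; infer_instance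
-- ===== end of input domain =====

-- B replaces A's buffer-accumulate-and-flush scan by two-pointer extraction of maximal
-- non-preposition runs (objective: alternative structure; B also drops A's redundant final
-- .strip() on each joined run, proved below to be a no-op on whitespace-free split words).

-- shared helper: the preposition set and the membership test both Pythons perform
def pvPreps : PySem.Set String :=
  PySem.Set.ofList ["with", "by", "in", "at", "on", "through", "to", "of", "from", "for", "as"]

def pvIsPrep (w : String) : Bool := PySem.Set.contains pvPreps (PySem.Str.lower w)

-- ===== PORT A =====
def split_by_prepositions (parts_list : List String) : List String :=
  parts_list.foldl (fun final_parts part =>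
    let st := (PySem.Str.split₀ (PySem.Str.strip part)).foldl
      (fun (st : List String × List String) word =>
      if pvIsPrep word then
        if st.2.isEmpty then st
        else (st.1 ++ [PySem.Str.strip (PySem.Str.join " " st.2)], ([] : List String))
      else (st.1, st.2 ++ [word]))
      (final_parts, ([] : List String))
    if st.2.isEmpty then st.1
    else st.1 ++ [PySem.Str.strip (PySem.Str.join " " st.2)]) []

-- ===== PORT B =====
-- Source B's inner while loop: skip prepositions; at a non-preposition, scan forward to the end
-- of the run (the inner j-loop = takeWhile), emit the joined run, continue after it (dropWhile).
def pvSplitRuns : List String → List String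
  | [] => []
  | w :: ws =>
      if pvIsPrep w then pvSplitRuns ws
      else PySem.Str.join " " (w :: ws.takeWhile (fun x => !pvIsPrep x)) ::
           pvSplitRuns (ws.dropWhile (fun x => !pvIsPrep x))
termination_by ws => ws.length
decreasing_by
  · simp
  · simpa using Nat.lt_succ_of_le (List.length_dropWhile_le _ _)

def split_by_prepositions_alt (parts_list : List String) : List String :=
  parts_list.foldl (fun final_parts part =>
    final_parts ++ pvSplitRuns (PySem.Str.split₀ (PySem.Str.strip part))) []

-- ===== PRECONDITION & SPEC =====
def Spec_split_by_prepositions (parts_list : List String) (out : List String) : Prop := out = split_by_prepositions_alt parts_list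
instance (parts_list : List String) (out : List String) : Decidable (Spec_split_by_prepositions parts_list out) := by unfold Spec_split_by_prepositions; infer_instance

-- ===== CLAIM (what is proved, stated in full; the proofs are below) =====
def Claim_equal_split_by_prepositions : Prop := ∀ (parts_list : List String), Dom_split_by_prepositions parts_list → Spec_split_by_prepositions parts_list (split_by_prepositions parts_list)

-- ===== LEMMAS AND PROOFS =====

-- a word produced by str.split(): nonempty, and free of whitespace characters
def pvGood (w : String) : Prop :=
  w.toList ≠ [] ∧ ∀ c ∈ w.toList, PySem.Chars.isspace c = false

-- A's inner word loop, rephrased as the list of parts it appends (first arg = buffer)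
def pvEmitW : List String → List String → List String
  | buffer, [] =>
      if buffer.isEmpty then [] else [PySem.Str.strip (PySem.Str.join " " buffer)]
  | buffer, w :: ws =>
      if pvIsPrep w then
        (if buffer.isEmpty then [] else [PySem.Str.strip (PySem.Str.join " " buffer)]) ++
          pvEmitW [] ws
      else pvEmitW (buffer ++ [w]) ws

-- run extraction, still carrying A's final .strip() on each joined run
def pvEA : List String → List String
  | [] => []
  | w :: ws =>
      if pvIsPrep w then pvEA ws
      else PySem.Str.strip (PySem.Str.join " " (w :: ws.takeWhile (fun x => !pvIsPrep x))) ::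
           pvEA (ws.dropWhile (fun x => !pvIsPrep x))
termination_by ws => ws.length
decreasing_by
  · simp
  · simpa using Nat.lt_succ_of_le (List.length_dropWhile_le _ _)

theorem pv_go_good (s : List Char) : ∀ (cur : List Char) (acc : List (List Char)),
    (∀ c ∈ cur, PySem.Chars.isspace c = false) →
    (∀ w ∈ acc, w ≠ [] ∧ ∀ c ∈ w, PySem.Chars.isspace c = false) →
    ∀ w ∈ PySem.Chars.split₀.go s cur acc, w ≠ [] ∧ ∀ c ∈ w, PySem.Chars.isspace c = false := by
  induction s with
  | nil =>
    intro cur acc hcur hacc w hw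
    by_cases h : cur.isEmpty
    · simp [PySem.Chars.split₀.go, h] at hw
      exact hacc w hw
    · simp [PySem.Chars.split₀.go, h] at hw
      rcases hw with hw | hw
      · exact hacc w hw
      · subst hw
        constructor
        · simp [List.isEmpty_iff] at h; simpa using h
        · intro c hc; exact hcur c (by simpa using hc)
  | cons a s ih =>
    intro cur acc hcur hacc w hw
    by_cases hs : PySem.Chars.isspace a
    · by_cases h : cur.isEmpty
      · simp only [PySem.Chars.split₀.go, hs, h, if_true] at hw
        exact ih [] acc (by simp) hacc w hw
      · simp only [PySem.Chars.split₀.go, hs, h, if_true, if_false, Bool.false_eq_true] at hw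
        refine ih [] _ (by simp) ?_ w hw
        intro v hv
        rcases List.mem_cons.mp hv with hv | hv
        · subst hv
          constructor
          · simp [List.isEmpty_iff] at h; simpa using h
          · intro c hc; exact hcur c (by simpa using hc)
        · exact hacc v hv
    · simp only [PySem.Chars.split₀.go, hs, Bool.false_eq_true, if_false] at hw
      refine ih (a :: cur) acc ?_ hacc w hw
      intro c hc
      rcases List.mem_cons.mp hc with hc | hc
      · subst hc; simpa using hs
      · exact hcur c hc

theorem pv_split₀_good (s : String) (w : String) (hw : w ∈ PySem.Str.split₀ s) : pvGood w := by
  simp only [PySem.Str.split₀, List.mem_map] at hw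
  rcases hw with ⟨l, hl, rfl⟩
  have := pv_go_good s.toList [] [] (by simp) (by simp) l hl
  simpa [pvGood] using this

theorem pv_strip_chars_id (cs : List Char) (c d : Char)
    (h1 : cs.head? = some c) (hc : PySem.Chars.isspace c = false)
    (h2 : cs.getLast? = some d) (hd : PySem.Chars.isspace d = false) :
    PySem.Chars.strip cs = cs := by
  obtain ⟨t, rfl⟩ : ∃ t, cs = c :: t := by
    cases cs with
    | nil => simp at h1
    | cons a t => simp at h1; exact ⟨t, by simp [h1]⟩
  have hl : PySem.Chars.lstrip (c :: t) = c :: t := by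
    simp [PySem.Chars.lstrip, List.dropWhile_cons_of_neg, hc]
  have hrev : ∃ r, (c :: t).reverse = d :: r := by
    have := List.head?_reverse (l := c :: t)
    rw [h2] at this
    cases hh : (c :: t).reverse with
    | nil => simp [hh] at this
    | cons a r => rw [hh] at this; simp at this; exact ⟨r, by simp [this]⟩
  obtain ⟨r, hr⟩ := hrev
  have hrs : PySem.Chars.rstrip (c :: t) = c :: t := by
    simp only [PySem.Chars.rstrip, hr]
    rw [List.dropWhile_cons_of_neg (by simp [hd])]
    rw [← hr, List.reverse_reverse]
  simp [PySem.Chars.strip, hl, hrs]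

theorem pv_join_head (l : List Char) (ls : List (List Char)) (h : l ≠ []) :
    (PySem.Chars.join [' '] (l :: ls)).head? = l.head? := by
  cases ls with
  | nil => simp [PySem.Chars.join_singleton]
  | cons m ms =>
    rw [PySem.Chars.join_cons_cons]
    cases l with
    | nil => exact absurd rfl h
    | cons a t => simp

theorem pv_join_last (ls : List (List Char)) (h : ∀ m ∈ ls, m ≠ ([] : List Char)) (hne : ls ≠ []) :
    ∃ d, (PySem.Chars.join [' '] ls).getLast? = some d ∧ ∃ m, m ∈ ls ∧ d ∈ m := by
  induction ls with
  | nil => exact absurd rfl hne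
  | cons l ms ih =>
    cases ms with
    | nil =>
      have hl := h l (by simp)
      refine ⟨l.getLast hl, ?_, l, by simp, List.getLast_mem hl⟩
      rw [PySem.Chars.join_singleton]
      exact List.getLast?_eq_some_getLast hl
    | cons m ms' =>
      obtain ⟨d, hd, mm, hmm, hdm⟩ := ih (fun x hx => h x (by simp [hx])) (by simp)
      refine ⟨d, ?_, mm, by simp [hmm], hdm⟩
      rw [PySem.Chars.join_cons_cons, List.append_assoc, List.getLast?_append]
      rw [List.getLast?_append, hd]
      rfl

theorem pv_strip_join_good (ws : List String) (hne : ws ≠ []) (hg : ∀ w ∈ ws, pvGood w) :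
    PySem.Str.strip (PySem.Str.join " " ws) = PySem.Str.join " " ws := by
  obtain ⟨w, rest, rfl⟩ : ∃ w rest, ws = w :: rest := by
    cases ws with
    | nil => exact absurd rfl hne
    | cons w rest => exact ⟨w, rest, rfl⟩
  have hJ : (PySem.Str.join " " (w :: rest)).toList
      = PySem.Chars.join [' '] ((w :: rest).map String.toList) := by
    simpa using PySem.Str.toList_join " " (w :: rest)
  obtain ⟨d, hd, m, hm, hdm⟩ := pv_join_last ((w :: rest).map String.toList)
    (by intro x hx
        simp only [List.mem_map] at hx
        obtain ⟨y, hy, rfl⟩ := hx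
        exact (hg y hy).1)
    (by simp)
  obtain ⟨y, hy, rfl⟩ := List.mem_map.mp hm
  have hdns : PySem.Chars.isspace d = false := (hg y hy).2 d hdm
  have hhead := pv_join_head w.toList (rest.map String.toList) (hg w (by simp)).1
  have hcns : ∃ c, w.toList.head? = some c ∧ PySem.Chars.isspace c = false := by
    cases hw : w.toList with
    | nil => exact absurd hw (hg w (by simp)).1
    | cons a t => exact ⟨a, by simp, (hg w (by simp)).2 a (by simp [hw])⟩
  obtain ⟨c, hch, hcns⟩ := hcns
  have key : PySem.Chars.strip ((PySem.Str.join " " (w :: rest)).toList)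
      = (PySem.Str.join " " (w :: rest)).toList := by
    apply pv_strip_chars_id _ c d
    · rw [hJ]; simp only [List.map_cons] at hhead ⊢; rw [hhead]; exact hch
    · exact hcns
    · rw [hJ]; simpa using hd
    · exact hdns
  calc PySem.Str.strip (PySem.Str.join " " (w :: rest))
      = String.ofList (PySem.Chars.strip ((PySem.Str.join " " (w :: rest)).toList)) := rfl
    _ = String.ofList ((PySem.Str.join " " (w :: rest)).toList) := by rw [key]
    _ = PySem.Str.join " " (w :: rest) := String.ofList_toList

theorem pv_EA_eq_splitRuns (ws : List String) (hg : ∀ w ∈ ws, pvGood w) :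
    pvEA ws = pvSplitRuns ws := by
  induction ws using pvSplitRuns.induct with
  | case1 => simp [pvEA, pvSplitRuns]
  | case2 w ws h ih =>
    rw [pvEA, pvSplitRuns, if_pos h, if_pos h]
    exact ih (fun x hx => hg x (by simp [hx]))
  | case3 w ws h ih =>
    rw [pvEA, pvSplitRuns, if_neg h, if_neg h]
    refine congrArg₂ _ ?_ ?_
    · apply pv_strip_join_good _ (by simp)
      intro y hy
      refine hg y ?_
      rcases List.mem_cons.mp hy with h' | h'
      · simp [h']
      · exact List.mem_cons_of_mem _ ((List.takeWhile_sublist _).subset h')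
    · exact ih (fun x hx => hg x (List.mem_cons_of_mem _ ((List.dropWhile_sublist _).subset hx)))

theorem pv_emitW_eq (ws : List String) : ∀ (buffer : List String),
    pvEmitW buffer ws =
      if buffer.isEmpty then pvEA ws
      else PySem.Str.strip (PySem.Str.join " " (buffer ++ ws.takeWhile (fun x => !pvIsPrep x))) ::
           pvEA (ws.dropWhile (fun x => !pvIsPrep x)) := by
  induction ws with
  | nil =>
    intro buffer
    cases buffer with
    | nil => simp [pvEmitW, pvEA]
    | cons b bs => simp [pvEmitW, pvEA]
  | cons w ws ih =>
    intro buffer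
    by_cases h : pvIsPrep w
    · cases buffer with
      | nil =>
        simp only [pvEmitW, h, if_true, List.isEmpty_nil, List.nil_append, if_pos]
        rw [ih []]
        simp [pvEA, h]
      | cons b bs =>
        simp only [pvEmitW, h, if_true, List.isEmpty_cons, Bool.false_eq_true, if_false]
        rw [ih []]
        simp only [List.isEmpty_nil, if_pos, List.isEmpty_cons, Bool.false_eq_true, if_false]
        rw [List.takeWhile_cons_of_neg (by simp [h]), List.dropWhile_cons_of_neg (by simp [h])]
        simp [pvEA, h]
    · cases buffer with
      | nil =>
        simp only [pvEmitW, h, Bool.false_eq_true, if_false, List.isEmpty_nil, if_pos]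
        rw [show ([] ++ [w] : List String) = [w] from rfl, ih [w]]
        simp only [List.isEmpty_cons, Bool.false_eq_true, if_false]
        rw [pvEA, if_neg h]
        simp
      | cons b bs =>
        simp only [pvEmitW, h, Bool.false_eq_true, if_false]
        rw [ih ((b :: bs) ++ [w])]
        simp only [List.isEmpty_cons, Bool.false_eq_true, if_false]
        rw [show ((b :: bs) ++ [w]).isEmpty = false by simp]
        rw [List.takeWhile_cons_of_pos (by simp [h]), List.dropWhile_cons_of_pos (by simp [h])]
        simp

theorem pv_innerA_eq (words : List String) : ∀ (acc buffer : List String),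
    (let st := words.foldl (fun (st : List String × List String) word =>
        if pvIsPrep word then
          if st.2.isEmpty then st
          else (st.1 ++ [PySem.Str.strip (PySem.Str.join " " st.2)], ([] : List String))
        else (st.1, st.2 ++ [word])) (acc, buffer)
     if st.2.isEmpty then st.1
     else st.1 ++ [PySem.Str.strip (PySem.Str.join " " st.2)]) = acc ++ pvEmitW buffer words := by
  induction words with
  | nil =>
    intro acc buffer
    cases hb : buffer.isEmpty
    · simp only [List.foldl_nil, hb, Bool.false_eq_true, if_false, pvEmitW]
    · simp only [List.foldl_nil, hb, if_true, pvEmitW]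
      simp [List.isEmpty_iff.mp hb]
  | cons w ws ih =>
    intro acc buffer
    simp only [List.foldl_cons]
    by_cases h : pvIsPrep w
    · cases hb : buffer.isEmpty
      · simp only [h, if_true, hb, Bool.false_eq_true, if_false]
        rw [ih (acc ++ [PySem.Str.strip (PySem.Str.join " " buffer)]) []]
        simp [pvEmitW, h, hb]
      · simp only [h, if_true, hb]
        rw [ih acc buffer, List.isEmpty_iff.mp hb]
        simp [pvEmitW, h]
    · simp only [h, Bool.false_eq_true, if_false]
      rw [ih acc (buffer ++ [w])]
      simp [pvEmitW, h]

theorem pv_part_eq (part : String) :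
    pvEmitW [] (PySem.Str.split₀ (PySem.Str.strip part))
      = pvSplitRuns (PySem.Str.split₀ (PySem.Str.strip part)) := by
  rw [pv_emitW_eq]
  simp only [List.isEmpty_nil, if_pos]
  exact pv_EA_eq_splitRuns _ (fun w hw => pv_split₀_good _ w hw)

theorem pv_stepA_eq (acc : List String) (part : String) :
    (let st := (PySem.Str.split₀ (PySem.Str.strip part)).foldl
      (fun (st : List String × List String) word =>
        if pvIsPrep word then
          if st.2.isEmpty then st
          else (st.1 ++ [PySem.Str.strip (PySem.Str.join " " st.2)], ([] : List String))
        else (st.1, st.2 ++ [word]))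
      (acc, ([] : List String))
     if st.2.isEmpty then st.1
     else st.1 ++ [PySem.Str.strip (PySem.Str.join " " st.2)])
    = acc ++ pvSplitRuns (PySem.Str.split₀ (PySem.Str.strip part)) :=
  (pv_innerA_eq _ acc []).trans (congrArg (acc ++ ·) (pv_part_eq part))

-- ===== VERDICT (by name: the statement is the Claim_ definition above) =====
theorem split_by_prepositions_spec : Claim_equal_split_by_prepositions := by
  intro parts_list _
  unfold Spec_split_by_prepositions split_by_prepositions split_by_prepositions_alt
  refine PySem.List.foldl_congr_mem _ _ _ _ ?_
  intro acc p _
  exact pv_stepA_eq acc p
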